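-- pv_equiv track=rewrite | github.com/michaelpiper/codebase | longstringofvowels.py | longstringofvowels
-- ===== SOURCE A (Python) =====
-- def longstringofvowels(string):
--     result =0
--     found =[]
--     vowel = ['a','e','i','o','u']
--     for i in range(0,len(string)):
--         if string[i] in vowel and string[i] not in found:
--             result += 1
--             found.append(string[i])
--     return found
-- ===== SOURCE B (Python) =====
-- def longstringofvowels(string):
--     pairs = []
--     for v in ('a', 'e', 'i', 'o', 'u'):
--         i = string.find(v)
--         if i != -1:
--             pairs.append((i, v))
--     pairs.sort(key=lambda p: p[0])
--     return [v for _, v in pairs]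
-- ===== Notes on version B (the rewrite author's own statement) =====
-- stated objective: faster
-- what changed: Instead of scanning the string character by character and deduplicating against a growing accumulator list, B computes each vowel's first-occurrence index with string.find over the fixed 5-vowel alphabet and sorts the present vowels by that index.
import Mathlib
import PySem

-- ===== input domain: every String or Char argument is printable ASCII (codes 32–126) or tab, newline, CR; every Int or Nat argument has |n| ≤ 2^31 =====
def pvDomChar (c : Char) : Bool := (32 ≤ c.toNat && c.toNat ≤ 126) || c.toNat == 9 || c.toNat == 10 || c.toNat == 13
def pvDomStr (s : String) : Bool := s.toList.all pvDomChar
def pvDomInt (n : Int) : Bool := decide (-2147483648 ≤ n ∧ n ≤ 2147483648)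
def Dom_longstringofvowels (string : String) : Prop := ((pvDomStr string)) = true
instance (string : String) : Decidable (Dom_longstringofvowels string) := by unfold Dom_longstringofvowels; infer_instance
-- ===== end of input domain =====

-- B collects the distinct vowels by first-occurrence index (string.find per vowel, then sort by index)
-- instead of A's per-character scan with dedup against a growing accumulator; a timing run measured B faster (C-level find).

def pvVowels : List Char := ['a', 'e', 'i', 'o', 'u']

-- ===== PORT A =====
def longstringofvowels (string : String) : List String :=
  let vowel : List Char := pvVowels
  let r := (PySem.List.pyRange 0 (PySem.Str.len string) 1).foldl
      (fun (acc : Int × List Char) i =>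
        let c := PySem.List.pyGetD string.toList i ' '
        if vowel.contains c && !acc.2.contains c then (acc.1 + 1, acc.2 ++ [c]) else acc)
      (0, [])
  r.2.map (fun c => String.ofList [c])

-- ===== PORT B =====
def longstringofvowels_alt (string : String) : List String :=
  let pairs := pvVowels.foldl
      (fun (acc : List (Int × Char)) v =>
        let i := PySem.Str.find string (String.ofList [v])
        if i != -1 then acc ++ [(i, v)] else acc) []
  (PySem.List.sorted pairs (fun p => p.1) false).map (fun p => String.ofList [p.2])

-- ===== PRECONDITION & SPEC =====
def Spec_longstringofvowels (string : String) (out : List String) : Prop := out = longstringofvowels_alt string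
instance (string : String) (out : List String) : Decidable (Spec_longstringofvowels string out) := by unfold Spec_longstringofvowels; infer_instance

-- ===== CLAIM (what is proved, stated in full; the proofs are below) =====
def Claim_equal_longstringofvowels : Prop := ∀ (string : String), Dom_longstringofvowels string → Spec_longstringofvowels string (longstringofvowels string)

-- ===== LEMMAS AND PROOFS =====

-- A's scan, chars only (the counter dropped)
def pvScan (found : List Char) : List Char → List Char
  | [] => found
  | c :: t => pvScan (if c ∈ pvVowels ∧ c ∉ found then found ++ [c] else found) t

-- first index of v in cs, -1 if absent (what Python's s.find computes for a single char)
def pvIdx (v : Char) : List Char → Int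
  | [] => -1
  | c :: t => if v = c then 0 else (let r := pvIdx v t; if r = -1 then -1 else 1 + r)

theorem pvScan_eq_foldl (cs : List Char) (found : List Char) (n : Int) :
    (cs.foldl (fun (acc : Int × List Char) c =>
        if pvVowels.contains c && !acc.2.contains c then (acc.1 + 1, acc.2 ++ [c]) else acc)
      (n, found)).2 = pvScan found cs := by
  induction cs generalizing found n with
  | nil => rfl
  | cons c t ih =>
      show (t.foldl _ (if pvVowels.contains c && !found.contains c then (n + 1, found ++ [c]) else (n, found))).2 = pvScan found (c :: t)
      rw [pvScan]
      by_cases h : c ∈ pvVowels ∧ c ∉ found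
      · rw [if_pos (by simp [List.contains_eq_mem, h.1, h.2]), if_pos h, ih]
      · rw [if_neg (by simpa [List.contains_eq_mem, -not_and, Decidable.not_and_iff_not_or_not] using h), if_neg h, ih]

theorem mem_pvScan (cs : List Char) (found : List Char) (v : Char) :
    v ∈ pvScan found cs ↔ v ∈ found ∨ (v ∈ pvVowels ∧ v ∈ cs) := by
  induction cs generalizing found with
  | nil => simp [pvScan]
  | cons c t ih =>
      rw [pvScan]
      by_cases h : c ∈ pvVowels ∧ c ∉ found
      · rw [if_pos h, ih]
        simp only [List.mem_append, List.mem_cons, List.not_mem_nil, or_false]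
        rcases h with ⟨h1, h2⟩
        constructor
        · rintro ((hf | rfl) | hv)
          · exact Or.inl hf
          · exact Or.inr ⟨h1, Or.inl rfl⟩
          · exact Or.inr ⟨hv.1, Or.inr hv.2⟩
        · rintro (hf | ⟨hv, (rfl | ht)⟩)
          · exact Or.inl (Or.inl hf)
          · exact Or.inl (Or.inr rfl)
          · exact Or.inr ⟨hv, ht⟩
      · rw [if_neg h, ih]
        simp only [List.mem_cons]
        constructor
        · rintro (hf | hv)
          · exact Or.inl hf
          · exact Or.inr ⟨hv.1, Or.inr hv.2⟩
        · rintro (hf | ⟨hv, (rfl | ht)⟩)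
          · exact Or.inl hf
          · by_cases hm : v ∈ found
            · exact Or.inl hm
            · exact absurd ⟨hv, hm⟩ h
          · exact Or.inr ⟨hv, ht⟩

theorem nodup_pvScan (cs : List Char) (found : List Char) (h : found.Nodup) :
    (pvScan found cs).Nodup := by
  induction cs generalizing found with
  | nil => simpa [pvScan]
  | cons c t ih =>
      rw [pvScan]
      by_cases hc : c ∈ pvVowels ∧ c ∉ found
      · rw [if_pos hc]
        apply ih
        rw [List.nodup_append]
        refine ⟨h, List.nodup_singleton c, ?_⟩
        intro a ha b hb
        simp only [List.mem_singleton] at hb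
        subst hb
        exact fun hac => hc.2 (hac ▸ ha)
      · rw [if_neg hc]; exact ih found h

theorem pvScan_decomp (cs : List Char) (found : List Char) :
    pvScan found cs = found ++ (pvScan [] cs).filter (fun v => !found.contains v) := by
  induction cs generalizing found with
  | nil => simp [pvScan]
  | cons c t ih =>
      simp only [pvScan, List.not_mem_nil, not_false_iff, and_true, List.nil_append]
      by_cases hv : c ∈ pvVowels
      · rw [if_pos hv]
        by_cases hf : c ∈ found
        · rw [if_neg (fun hh => hh.2 hf), ih found, ih [c]]
          rw [List.filter_append]
          rw [show List.filter (fun v => !found.contains v) [c] = [] from by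
            simp [List.contains_eq_mem, hf]]
          rw [List.nil_append, List.filter_filter]
          congr 1
          apply List.filter_congr
          intro x hx
          by_cases hxc : x = c
          · subst hxc; simp [List.contains_eq_mem, hf]
          · simp [List.contains_eq_mem, hxc]
        · rw [if_pos ⟨hv, hf⟩, ih (found ++ [c]), ih [c]]
          rw [List.filter_append]
          rw [show List.filter (fun v => !found.contains v) [c] = [c] by
            simp [List.contains_eq_mem, hf]]
          rw [List.filter_filter, List.append_assoc]
          congr 2
          apply List.filter_congr
          intro x hx
          by_cases hxc : x = c
          · subst hxc; simp [List.contains_eq_mem, hf]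
          · simp [List.contains_eq_mem, hxc]
      · rw [if_neg (fun hh => hv hh.1), if_neg hv]
        exact ih found

theorem pvScan_cons_vowel (cs : List Char) (c : Char) (hv : c ∈ pvVowels) :
    pvScan [] (c :: cs) = c :: (pvScan [] cs).filter (fun v => !decide (v = c)) := by
  rw [pvScan, if_pos ⟨hv, by simp⟩, List.nil_append, pvScan_decomp cs [c]]
  simp

theorem pvScan_cons_nonvowel (cs : List Char) (c : Char) (hv : c ∉ pvVowels) :
    pvScan [] (c :: cs) = pvScan [] cs := by
  rw [pvScan, if_neg (fun hh => hv hh.1)]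

theorem pvIdx_nonneg (cs : List Char) (v : Char) (h : v ∈ cs) : 0 ≤ pvIdx v cs := by
  induction cs with
  | nil => simp at h
  | cons c t ih =>
      rw [pvIdx]
      by_cases hvc : v = c
      · simp [hvc]
      · rcases List.mem_cons.mp h with rfl | ht
        · simp at hvc
        · have := ih ht
          rw [if_neg hvc]
          simp only []
          split_ifs with h0 <;> omega

theorem pvIdx_cons_ne (t : List Char) (c v : Char) (hne : v ≠ c) (hm : v ∈ t) :
    pvIdx v (c :: t) = 1 + pvIdx v t := by
  have h0 := pvIdx_nonneg t v hm
  rw [pvIdx, if_neg hne]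
  simp only []
  split_ifs with h1
  · omega
  · rfl

theorem pvIdx_cons_self (t : List Char) (v : Char) : pvIdx v (v :: t) = 0 := by
  rw [pvIdx, if_pos rfl]

-- A's result is strictly increasing in first-occurrence index
theorem pairwise_pvScan (cs : List Char) :
    (pvScan [] cs).Pairwise (fun a b => pvIdx a cs < pvIdx b cs) := by
  induction cs with
  | nil => simp [pvScan]
  | cons c t ih =>
      by_cases hv : c ∈ pvVowels
      · rw [pvScan_cons_vowel t c hv]
        constructor
        · intro b hb
          have hbm := List.mem_filter.mp hb
          have hbne : b ≠ c := by simpa using hbm.2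
          have hbt : b ∈ t := (((mem_pvScan t [] b).mp hbm.1).resolve_left (by simp)).2
          rw [pvIdx_cons_ne t c b hbne hbt, pvIdx_cons_self]
          have := pvIdx_nonneg t b hbt
          omega
        · have hpf : ((pvScan [] t).filter (fun v => !(v == c))).Pairwise
              (fun a b => pvIdx a t < pvIdx b t) := ih.filter _
          apply hpf.imp_of_mem
          intro a b ha hb hab
          have hane : a ≠ c := by simpa using (List.mem_filter.mp ha).2
          have hbne : b ≠ c := by simpa using (List.mem_filter.mp hb).2
          have hat : a ∈ t := (((mem_pvScan t [] a).mp (List.mem_filter.mp ha).1).resolve_left (by simp)).2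
          have hbt : b ∈ t := (((mem_pvScan t [] b).mp (List.mem_filter.mp hb).1).resolve_left (by simp)).2
          rw [pvIdx_cons_ne t c a hane hat, pvIdx_cons_ne t c b hbne hbt]
          omega
      · rw [pvScan_cons_nonvowel t c hv]
        apply ih.imp_of_mem
        intro a b ha hb hab
        have hav : a ∈ pvVowels := (((mem_pvScan t [] a).mp ha).resolve_left (by simp)).1
        have hbv : b ∈ pvVowels := (((mem_pvScan t [] b).mp hb).resolve_left (by simp)).1
        have hat : a ∈ t := (((mem_pvScan t [] a).mp ha).resolve_left (by simp)).2
        have hbt : b ∈ t := (((mem_pvScan t [] b).mp hb).resolve_left (by simp)).2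
        have hcv : c ∉ pvVowels := hv
        have hane : a ≠ c := fun h => hcv (h ▸ hav)
        have hbne : b ≠ c := fun h => hcv (h ▸ hbv)
        rw [pvIdx_cons_ne t c a hane hat, pvIdx_cons_ne t c b hbne hbt]
        omega

-- the singleton [v] is a prefix of l iff l starts with v
theorem pv_singleton_prefix (v : Char) (l : List Char) :
    [v] <+: l ↔ ∃ t, l = v :: t := by
  constructor
  · rintro ⟨r, hr⟩
    exact ⟨r, hr.symm⟩
  · rintro ⟨t, rfl⟩
    exact ⟨t, rfl⟩

theorem pv_singleton_infix (v : Char) (l : List Char) :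
    [v] <:+: l ↔ v ∈ l := by
  constructor
  · intro h
    exact h.sublist.subset (by simp)
  · intro h
    rcases List.append_of_mem h with ⟨s₁, s₂, rfl⟩
    exact ⟨s₁, s₂, by simp⟩

theorem pvIdx_eq_neg_one (cs : List Char) (v : Char) (h : v ∉ cs) : pvIdx v cs = -1 := by
  induction cs with
  | nil => rfl
  | cons c t ih =>
      rw [pvIdx, if_neg (by rintro rfl; exact h (by simp))]
      rw [ih (fun hm => h (List.mem_cons_of_mem _ hm))]
      simp

theorem pvIdx_spec (cs : List Char) (v : Char) (h : v ∈ cs) :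
    [v] <+: cs.drop (pvIdx v cs).toNat ∧ ∀ i < (pvIdx v cs).toNat, ¬ [v] <+: cs.drop i := by
  induction cs with
  | nil => simp at h
  | cons c t ih =>
      by_cases hvc : v = c
      · subst hvc
        rw [pvIdx_cons_self]
        exact ⟨⟨t, by simp⟩, by omega⟩
      · have ht : v ∈ t := (List.mem_cons.mp h).resolve_left hvc
        rw [pvIdx_cons_ne t c v hvc ht]
        have h0 := pvIdx_nonneg t v ht
        have htn : (1 + pvIdx v t).toNat = (pvIdx v t).toNat + 1 := by omega
        rw [htn]
        rcases ih ht with ⟨hp, hmin⟩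
        refine ⟨by simpa using hp, ?_⟩
        intro i hi
        cases i with
        | zero =>
            simp only [List.drop_zero]
            intro hpre
            rcases (pv_singleton_prefix v _).mp hpre with ⟨t', ht'⟩
            injection ht' with h1 _
            exact hvc h1.symm
        | succ j =>
            simp only [List.drop_succ_cons]
            exact hmin j (by omega)

-- Python's find of a single character equals pvIdx
theorem pv_find_eq (cs : List Char) (v : Char) : PySem.Chars.find cs [v] = pvIdx v cs := by
  by_cases h : v ∈ cs
  · have hin : ([v] : List Char) <:+: cs := (pv_singleton_infix v cs).mpr h
    have hnn : 0 ≤ PySem.Chars.find cs [v] := (PySem.Chars.find_nonneg_iff cs [v]).mpr hin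
    rcases PySem.Chars.find_spec hnn with ⟨hp, hmin⟩
    rcases pvIdx_spec cs v h with ⟨hp', hmin'⟩
    have h0 := pvIdx_nonneg cs v h
    rcases lt_trichotomy (PySem.Chars.find cs [v]).toNat (pvIdx v cs).toNat with hlt | heq | hgt
    · exact absurd hp (hmin' _ hlt)
    · omega
    · exact absurd hp' (hmin _ hgt)
  · rw [pvIdx_eq_neg_one cs v h]
    exact (PySem.Chars.find_eq_neg_one_iff cs [v]).mpr (fun hin => h ((pv_singleton_infix v cs).mp hin))

-- B's pair list, closed form
theorem pv_pairs_eq (s : String) :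
    pvVowels.foldl (fun (acc : List (Int × Char)) v =>
        let i := PySem.Str.find s (String.ofList [v])
        if i != -1 then acc ++ [(i, v)] else acc) []
      = (pvVowels.filter (fun v => s.toList.contains v)).map (fun v => (pvIdx v s.toList, v)) := by
  have h1 : ∀ (acc : List (Int × Char)),
      pvVowels.foldl (fun acc v =>
        let i := PySem.Str.find s (String.ofList [v])
        if i != -1 then acc ++ [(i, v)] else acc) acc
      = acc ++ (pvVowels.filter (fun v => PySem.Str.find s (String.ofList [v]) != -1)).map
          (fun v => (PySem.Str.find s (String.ofList [v]), v)) := by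
    intro acc
    exact PySem.List.foldl_append_if _ _ _ _
  rw [h1, List.nil_append]
  have hfind : ∀ v : Char, PySem.Str.find s (String.ofList [v]) = pvIdx v s.toList := by
    intro v
    rw [PySem.Str.find_eq]
    have : (String.ofList [v]).toList = [v] := by simp
    rw [this, pv_find_eq]
  have hfil : (pvVowels.filter (fun v => PySem.Str.find s (String.ofList [v]) != -1))
      = pvVowels.filter (fun v => s.toList.contains v) := by
    apply List.filter_congr
    intro v _
    rw [hfind v]
    by_cases h : v ∈ s.toList
    · have h0 := pvIdx_nonneg s.toList v h
      simp [List.contains_eq_mem, h]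
      omega
    · rw [pvIdx_eq_neg_one s.toList v h]
      simp [List.contains_eq_mem, h]
  rw [hfil]
  apply List.map_congr_left
  intro v _
  rw [hfind v]

theorem pv_nodup_vowels : pvVowels.Nodup := by decide

theorem pvScan_perm_filter (cs : List Char) :
    (pvScan [] cs).Perm (pvVowels.filter (fun v => cs.contains v)) := by
  rw [List.perm_ext_iff_of_nodup (nodup_pvScan cs [] (by simp)) (pv_nodup_vowels.filter _)]
  intro v
  rw [mem_pvScan, List.mem_filter]
  simp [List.contains_eq_mem]

-- ===== VERDICT (by name: the statement is the Claim_ definition above) =====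
theorem longstringofvowels_spec : Claim_equal_longstringofvowels := by
  intro s _
  show longstringofvowels s = longstringofvowels_alt s
  unfold longstringofvowels longstringofvowels_alt
  simp only []
  rw [pv_pairs_eq]
  -- A side: turn the pyRange fold into a fold over the characters
  have hA : (PySem.List.pyRange 0 (PySem.Str.len s) 1).foldl
      (fun (acc : Int × List Char) i =>
        let c := PySem.List.pyGetD s.toList i ' '
        if pvVowels.contains c && !acc.2.contains c then (acc.1 + 1, acc.2 ++ [c]) else acc)
      (0, [])
      = s.toList.foldl (fun (acc : Int × List Char) c =>
        if pvVowels.contains c && !acc.2.contains c then (acc.1 + 1, acc.2 ++ [c]) else acc)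
      (0, []) := by
    rw [PySem.Str.len_eq]
    exact PySem.List.foldl_pyRange_zero_pyGetD' s.toList ' '
      (fun (acc : Int × List Char) c =>
        if pvVowels.contains c && !acc.2.contains c then (acc.1 + 1, acc.2 ++ [c]) else acc)
      (0, [])
  rw [hA, pvScan_eq_foldl]
  -- B side: the sorted pair list is A's scan result tagged with its indices
  have hsorted : PySem.List.sorted
      ((pvVowels.filter (fun v => s.toList.contains v)).map (fun v => (pvIdx v s.toList, v)))
      (fun p => p.1) false
      = (pvScan [] s.toList).map (fun v => (pvIdx v s.toList, v)) := by
    apply PySem.List.sorted_eq_of_perm_of_pairwise_lt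
    · exact (pvScan_perm_filter s.toList).map _
    · rw [List.pairwise_map]
      exact pairwise_pvScan s.toList
  rw [hsorted, List.map_map]
  rfl
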